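-- pv_equiv track=rewrite | github.com/mxschlz/psychopy-experiments | SPACECUE/generate_subject_sequence.py | _check_max_consecutive_items
-- ===== SOURCE A (Python) =====
-- def _check_max_consecutive_items(data_list: list, item_to_check: any, max_allowed: int) -> bool:
--     """
--     Checks if an item appears consecutively more than max_allowed times in a list.
--     (Implementation as provided previously)
--     """
--     if not data_list or max_allowed <= 0:
--         if max_allowed <= 0 and item_to_check in data_list:
--             return False
--         return True
--     current_consecutive = 0
--     for item in data_list:
--         if item == item_to_check:
--             current_consecutive += 1
--             if current_consecutive > max_allowed:
--                 return False
--         else: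
--             current_consecutive = 0
--     return True
-- ===== SOURCE B (Python) =====
-- def _check_max_consecutive_items(data_list: list, item_to_check: any, max_allowed: int) -> bool:
--     """
--     Checks if an item appears consecutively more than max_allowed times in a list.
--     Two-phase: split the list into maximal consecutive runs keyed by the
--     predicate (x == item_to_check), then check every matching run's length.
--     No special-case guard is needed: an empty list has no runs, and
--     max_allowed <= 0 makes any matching run (length >= 1) too long.
--     """
--     runs = []
--     for x in data_list:
--         key = (x == item_to_check)
--         if runs and runs[-1][0] == key:
--             runs[-1] = (key, runs[-1][1] + 1)
--         else:
--             runs.append((key, 1))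
--     return all(count <= max_allowed for key, count in runs if key)
-- ===== Notes on version B (the rewrite author's own statement) =====
-- stated objective: alternative
-- what changed: Replaces A's guarded early-exit counter loop with a two-phase groupby-style decomposition: first split the list into maximal consecutive runs keyed by (x == item_to_check), then check every matching run's length; the empty-list/max_allowed<=0 guard disappears because it falls out of the run formulation.
import Mathlib
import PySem

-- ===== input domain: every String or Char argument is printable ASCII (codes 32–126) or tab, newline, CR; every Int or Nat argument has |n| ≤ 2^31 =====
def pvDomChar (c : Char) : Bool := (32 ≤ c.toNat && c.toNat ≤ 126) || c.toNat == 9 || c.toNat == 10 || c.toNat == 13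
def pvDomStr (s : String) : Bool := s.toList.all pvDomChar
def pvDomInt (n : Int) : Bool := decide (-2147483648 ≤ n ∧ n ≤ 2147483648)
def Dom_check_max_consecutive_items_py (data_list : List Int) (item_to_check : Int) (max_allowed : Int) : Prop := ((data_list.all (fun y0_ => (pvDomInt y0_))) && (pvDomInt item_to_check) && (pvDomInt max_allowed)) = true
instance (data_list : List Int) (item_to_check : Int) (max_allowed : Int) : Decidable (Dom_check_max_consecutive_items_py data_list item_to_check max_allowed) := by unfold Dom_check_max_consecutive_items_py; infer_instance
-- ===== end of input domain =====

-- B replaces A's guarded early-exit counter loop by a two-phase run decomposition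
-- (split into maximal consecutive runs keyed by the predicate, then bound each
-- matching run's length); same O(n) cost, no special-case guard needed.

-- ===== PORT A =====
-- the for-loop of A with its early return, state = current_consecutive
def pvLoopA (item m : Int) : List Int → Int → Bool
  | [], _ => true
  | x :: xs, cur =>
    if x == item then
      if cur + 1 > m then false else pvLoopA item m xs (cur + 1)
    else pvLoopA item m xs 0

def check_max_consecutive_items_py (data_list : List Int) (item_to_check : Int) (max_allowed : Int) : Bool :=
  if data_list = [] ∨ max_allowed ≤ 0 then
    if max_allowed ≤ 0 ∧ data_list.contains item_to_check then false else true
  else pvLoopA item_to_check max_allowed data_list 0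

-- ===== PORT B =====
-- Source B's loop body: extend the last run (`runs[-1]`) or append a new one.
-- The runs list is kept in REVERSE order (head = python's runs[-1]); the final
-- `all` is order-independent, so checking the reversed list is the same test.
def pvStep (item : Int) (acc : List (Bool × Int)) (x : Int) : List (Bool × Int) :=
  let key := x == item
  match acc with
  | (k, n) :: rest => if k == key then (k, n + 1) :: rest else (key, 1) :: (k, n) :: rest
  | [] => [(key, 1)]

def check_max_consecutive_items_py_alt (data_list : List Int) (item_to_check : Int) (max_allowed : Int) : Bool :=
  (data_list.foldl (pvStep item_to_check) []).all (fun p => !p.1 || decide (p.2 ≤ max_allowed))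

-- ===== PRECONDITION & SPEC =====
def Spec_check_max_consecutive_items_py (data_list : List Int) (item_to_check : Int) (max_allowed : Int) (out : Bool) : Prop := out = check_max_consecutive_items_py_alt data_list item_to_check max_allowed
instance (data_list : List Int) (item_to_check : Int) (max_allowed : Int) (out : Bool) : Decidable (Spec_check_max_consecutive_items_py data_list item_to_check max_allowed out) := by unfold Spec_check_max_consecutive_items_py; infer_instance

-- ===== CLAIM (what is proved, stated in full; the proofs are below) =====
def Claim_equal_check_max_consecutive_items_py : Prop := ∀ (data_list : List Int) (item_to_check : Int) (max_allowed : Int), Dom_check_max_consecutive_items_py data_list item_to_check max_allowed → Spec_check_max_consecutive_items_py data_list item_to_check max_allowed (check_max_consecutive_items_py data_list item_to_check max_allowed)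

-- ===== LEMMAS AND PROOFS =====

theorem loopA_cons_match (item m x : Int) (xs : List Int) (cur : Int) (h : (x == item) = true) :
    pvLoopA item m (x :: xs) cur = if cur + 1 > m then false else pvLoopA item m xs (cur + 1) := by
  simp [pvLoopA, h]

theorem loopA_cons_nomatch (item m x : Int) (xs : List Int) (cur : Int) (h : (x == item) = false) :
    pvLoopA item m (x :: xs) cur = pvLoopA item m xs 0 := by
  simp [pvLoopA, h]

-- structured forward version of B's run construction: state = current run (k, n)
def pvGo (item : Int) : List Int → Bool → Int → List (Bool × Int)
  | [], k, n => [(k, n)]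
  | x :: xs, k, n =>
    if (x == item) == k then pvGo item xs k (n + 1)
    else (k, n) :: pvGo item xs (x == item) 1

def pvAllp (m : Int) (l : List (Bool × Int)) : Bool := l.all (fun p => !p.1 || decide (p.2 ≤ m))

-- the foldl with a reversed accumulator tests the same thing as pvGo
theorem pv_foldl_go (item m : Int) : ∀ (xs : List Int) (k : Bool) (n : Int) (acc : List (Bool × Int)),
    pvAllp m (xs.foldl (pvStep item) ((k, n) :: acc)) = (pvAllp m acc && pvAllp m (pvGo item xs k n)) := by
  intro xs
  induction xs with
  | nil => intro k n acc; simp [pvAllp, pvGo, Bool.and_comm]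
  | cons x xs ih =>
    intro k n acc
    show pvAllp m (List.foldl (pvStep item) (pvStep item ((k, n) :: acc) x) xs) = _
    by_cases h : (k == (x == item)) = true
    · have hk : (x == item) = k := by cases k <;> cases hx : (x == item) <;> simp_all
      rw [show pvStep item ((k, n) :: acc) x = (k, n + 1) :: acc by simp [pvStep, h]]
      rw [ih k (n + 1) acc]
      rw [show pvGo item (x :: xs) k n = pvGo item xs k (n + 1) by simp [pvGo, hk]]
    · have hk : ¬ (x == item) = k := by cases k <;> cases hx : (x == item) <;> simp_all
      rw [show pvStep item ((k, n) :: acc) x = ((x == item), 1) :: (k, n) :: acc by simp [pvStep, h]]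
      rw [ih (x == item) 1 ((k, n) :: acc)]
      rw [show pvGo item (x :: xs) k n = (k, n) :: pvGo item xs (x == item) 1 by simp [pvGo, hk]]
      simp [pvAllp, Bool.and_assoc, Bool.and_left_comm]

-- the first run produced by pvGo has key k and length ≥ n
theorem pv_go_head (item : Int) : ∀ (xs : List Int) (k : Bool) (n : Int),
    ∃ n' rest, pvGo item xs k n = (k, n') :: rest ∧ n ≤ n' := by
  intro xs
  induction xs with
  | nil => intro k n; exact ⟨n, [], rfl, le_refl n⟩
  | cons x xs ih =>
    intro k n
    by_cases h : (x == item) = k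
    · obtain ⟨n', rest, he, hle⟩ := ih k (n + 1)
      exact ⟨n', rest, by simp [pvGo, h, he], by omega⟩
    · exact ⟨n, pvGo item xs (x == item) 1, by simp [pvGo, h], le_refl n⟩

-- pvGo's test equals A's loop, provided a pending matching run has not yet exceeded m
theorem pv_go_loopA (item m : Int) : ∀ (xs : List Int) (k : Bool) (n : Int), 1 ≤ n → (k = true → n ≤ m) →
    pvAllp m (pvGo item xs k n) = pvLoopA item m xs (if k then n else 0) := by
  intro xs
  induction xs with
  | nil =>
    intro k n h1 hk
    cases k with
    | false => simp [pvAllp, pvGo, pvLoopA]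
    | true => simp [pvAllp, pvGo, pvLoopA, hk rfl]
  | cons x xs ih =>
    intro k n h1 hk
    cases hx : (x == item) with
    | true =>
      cases k with
      | true =>
        rw [show pvGo item (x :: xs) true n = pvGo item xs true (n + 1) by simp [pvGo, hx]]
        rw [if_pos rfl, loopA_cons_match item m x xs n hx]
        by_cases hm : n + 1 ≤ m
        · rw [if_neg (by omega)]
          have := ih true (n + 1) (by omega) (fun _ => hm)
          rw [if_pos rfl] at this; exact this
        · rw [if_pos (by omega)]
          obtain ⟨n', rest, he, hle⟩ := pv_go_head item xs true (n + 1)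
          rw [he]; simp [pvAllp, show ¬ n' ≤ m by omega]
      | false =>
        rw [show pvGo item (x :: xs) false n = (false, n) :: pvGo item xs (x == item) 1 by
              simp [pvGo, hx]]
        rw [hx, if_neg (by simp), loopA_cons_match item m x xs 0 hx]
        rw [show pvAllp m ((false, n) :: pvGo item xs true 1) = pvAllp m (pvGo item xs true 1) by
              simp [pvAllp]]
        by_cases hm : 1 ≤ m
        · rw [if_neg (by omega)]
          have := ih true 1 le_rfl (fun _ => hm)
          rw [if_pos rfl] at this
          rw [show (0 : Int) + 1 = 1 by norm_num]; exact this
        · rw [if_pos (by omega)]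
          obtain ⟨n', rest, he, hle⟩ := pv_go_head item xs true 1
          rw [he]; simp [pvAllp, show ¬ n' ≤ m by omega]
    | false =>
      cases k with
      | true =>
        rw [show pvGo item (x :: xs) true n = (true, n) :: pvGo item xs (x == item) 1 by
              simp [pvGo, hx]]
        rw [hx, if_pos rfl, loopA_cons_nomatch item m x xs n hx]
        have := ih false 1 le_rfl (by simp)
        rw [if_neg (by simp)] at this
        rw [show pvAllp m ((true, n) :: pvGo item xs false 1)
              = (decide (n ≤ m) && pvAllp m (pvGo item xs false 1)) by simp [pvAllp]]
        rw [this, decide_eq_true (hk rfl), Bool.true_and]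
      | false =>
        rw [show pvGo item (x :: xs) false n = pvGo item xs false (n + 1) by simp [pvGo, hx]]
        rw [if_neg (by simp), loopA_cons_nomatch item m x xs 0 hx]
        have := ih false (n + 1) (by omega) (by simp)
        rw [if_neg (by simp)] at this; exact this

-- with max_allowed ≤ 0, A's loop is exactly a membership test
theorem pv_loopA_nonpos (item m : Int) (hm : m ≤ 0) : ∀ xs : List Int,
    pvLoopA item m xs 0 = !(xs.contains item) := by
  intro xs
  induction xs with
  | nil => simp [pvLoopA]
  | cons x xs ih =>
    cases hx : (x == item) with
    | true =>
      have hxe : x = item := by simpa using hx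
      rw [loopA_cons_match item m x xs 0 hx, if_pos (by omega)]
      simp [List.contains_eq_mem, hxe]
    | false =>
      have hxne : ¬ item = x := fun he => by simp [he] at hx
      rw [loopA_cons_nomatch item m x xs 0 hx, ih]
      simp [List.contains_eq_mem, List.mem_cons, hxne]

-- B's value equals A's value, for every input
theorem pv_main (xs : List Int) (item m : Int) :
    check_max_consecutive_items_py xs item m = check_max_consecutive_items_py_alt xs item m := by
  cases xs with
  | nil => simp [check_max_consecutive_items_py, check_max_consecutive_items_py_alt]
  | cons x t =>
    have hfold : check_max_consecutive_items_py_alt (x :: t) item m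
        = pvAllp m (pvGo item t (x == item) 1) := by
      show pvAllp m (List.foldl (pvStep item) (pvStep item [] x) t) = _
      rw [show pvStep item [] x = [((x == item), 1)] from rfl, pv_foldl_go]
      simp [pvAllp]
    by_cases hm : m ≤ 0
    · have hA : check_max_consecutive_items_py (x :: t) item m
          = (if m ≤ 0 ∧ (x :: t).contains item then false else true) := by
        simp [check_max_consecutive_items_py, hm]
      cases hx : (x == item) with
      | true =>
        have hxe : x = item := by simpa using hx
        rw [hA, hfold, hx]
        obtain ⟨n', rest, he, hle⟩ := pv_go_head item t true 1
        rw [he]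
        simp [pvAllp, hm, List.contains_eq_mem, hxe, show ¬ n' ≤ m by omega]
      | false =>
        have hxne : ¬ item = x := fun he => by simp [he] at hx
        rw [hA, hfold, hx, pv_go_loopA item m t false 1 le_rfl (by simp)]
        rw [if_neg (show ¬ (false = true) by simp)]
        rw [pv_loopA_nonpos item m hm t]
        rw [show (x :: t).contains item = t.contains item by
              simp [List.contains_eq_mem, List.mem_cons, hxne]]
        cases hc : t.contains item <;> simp [hm]
    · have hA : check_max_consecutive_items_py (x :: t) item m = pvLoopA item m (x :: t) 0 := by
        simp [check_max_consecutive_items_py, hm]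
      rw [hA, hfold]
      cases hx : (x == item) with
      | true =>
        rw [loopA_cons_match item m x t 0 hx, if_neg (by omega)]
        rw [pv_go_loopA item m t true 1 le_rfl (fun _ => by omega), if_pos rfl]
        rw [show (0 : Int) + 1 = 1 by norm_num]
      | false =>
        rw [loopA_cons_nomatch item m x t 0 hx]
        rw [pv_go_loopA item m t false 1 le_rfl (by simp)]
        rw [if_neg (show ¬ (false = true) by simp)]

-- ===== VERDICT (by name: the statement is the Claim_ definition above) =====
theorem check_max_consecutive_items_py_spec : Claim_equal_check_max_consecutive_items_py := by
  intro data_list item_to_check max_allowed _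
  unfold Spec_check_max_consecutive_items_py
  exact pv_main data_list item_to_check max_allowed
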